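-- pv_equiv track=rewrite | github.com/GitMonsters/octotetrahedral-agi | re_arc_bench_solves/5b984a1a.py | transform
-- ===== SOURCE A (Python) =====
-- def transform(grid: list[list[int]]) -> list[list[int]]:
--     H = len(grid)
--     W = len(grid[0])
--
--     # Find background color (center pixel)
--     bg_color = grid[H // 2][W // 2]
--
--     # Find corners with markers
--     corners = [(0, 0), (0, W - 1), (H - 1, 0), (H - 1, W - 1)]
--     marker_corners = []
--     marker_color = None
--
--     for r, c in corners:
--         if grid[r][c] != bg_color:
--             marker_corners.append((r, c))
--             marker_color = grid[r][c]
--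
--     # Period for tiling diagonals
--     period = 2 * min(H - 1, W - 1)
--
--     # Get diagonal values of marker corners mod period
--     corner_diffs = set((mr - mc) % period for mr, mc in marker_corners)
--     corner_sums = set((mr + mc) % period for mr, mc in marker_corners)
--
--     # Create output grid filled with yellow (4)
--     output = [[4 for _ in range(W)] for _ in range(H)]
--
--     # Draw tiled diagonals
--     for r in range(H):
--         for c in range(W):
--             # Cell is on marker diagonal if its r-c or r+c matches a corner mod period
--             on_diag = ((r - c) % period in corner_diffs) or ((r + c) % period in corner_sums)
--             if on_diag:
--                 output[r][c] = marker_color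
--
--     return output
-- ===== SOURCE B (Python) =====
-- def transform(grid: list[list[int]]) -> list[list[int]]:
--     H = len(grid)
--     W = len(grid[0])
--
--     bg_color = grid[H // 2][W // 2]
--     period = 2 * min(H - 1, W - 1)
--
--     # Marker detection fused with diagonal-key computation (one pass over the corners).
--     marker_color = None
--     corner_diffs = set()
--     corner_sums = set()
--     for r, c in [(0, 0), (0, W - 1), (H - 1, 0), (H - 1, W - 1)]:
--         if grid[r][c] != bg_color:
--             marker_color = grid[r][c]
--             corner_diffs.add((r - c) % period)
--             corner_sums.add((r + c) % period)
--
--     # Draw the tiled diagonals directly instead of testing every cell.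
--     out = []
--     for r in range(H):
--         row = [4] * W
--         for d in corner_diffs:
--             for c in range((r - d) % period, W, period):
--                 row[c] = marker_color
--         for s in corner_sums:
--             for c in range((s - r) % period, W, period):
--                 row[c] = marker_color
--         out.append(row)
--     return out
-- ===== Notes on version B (the rewrite author's own statement) =====
-- stated objective: faster
-- what changed: Instead of testing every cell of the HxW grid for membership of its two diagonal keys in the corner sets, B builds each all-yellow row once and draws the (at most four) tiled diagonals directly, stepping through each row by the period, so the per-cell set-membership scan disappears.
import Mathlib
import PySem

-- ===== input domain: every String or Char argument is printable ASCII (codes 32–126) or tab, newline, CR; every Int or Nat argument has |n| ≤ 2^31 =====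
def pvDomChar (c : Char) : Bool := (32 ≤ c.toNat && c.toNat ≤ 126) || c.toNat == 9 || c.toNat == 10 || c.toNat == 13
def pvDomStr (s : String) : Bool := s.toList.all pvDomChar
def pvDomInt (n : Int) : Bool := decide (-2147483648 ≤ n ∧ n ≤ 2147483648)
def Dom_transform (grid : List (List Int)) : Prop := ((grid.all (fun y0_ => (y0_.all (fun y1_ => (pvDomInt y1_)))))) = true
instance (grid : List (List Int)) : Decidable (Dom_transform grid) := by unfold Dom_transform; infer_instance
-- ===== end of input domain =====

-- B redraws the marker diagonals line by line (stepping by the period) instead of testing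
-- every cell for membership; return values agree on all of Pre_transform (A's exact domain).

-- ===== PORT A =====
-- grid[r][c]; under Pre_transform every use is in range, so the getD defaults are never taken
def pvCellA (grid : List (List Int)) (r c : Int) : Int :=
  (PySem.List.pyGet? ((PySem.List.pyGet? grid r).getD []) c).getD 0

def transform (grid : List (List Int)) : List (List Int) :=
  let H : Int := grid.length
  let W : Int := ((PySem.List.pyGet? grid 0).getD []).length
  let bg := pvCellA grid (PySem.Int.floordiv H 2) (PySem.Int.floordiv W 2)
  let corners : List (Int × Int) := [(0, 0), (0, W - 1), (H - 1, 0), (H - 1, W - 1)]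
  -- for r, c in corners: if grid[r][c] != bg: marker_corners.append((r,c)); marker_color = grid[r][c]
  let mk := corners.foldl
    (fun (st : List (Int × Int) × Option Int) rc =>
      if pvCellA grid rc.1 rc.2 ≠ bg then (st.1 ++ [rc], some (pvCellA grid rc.1 rc.2)) else st)
    ([], none)
  let period : Int := 2 * min (H - 1) (W - 1)
  let cornerDiffs : PySem.Set Int :=
    PySem.Set.ofList (mk.1.map (fun rc => PySem.Int.mod (rc.1 - rc.2) period))
  let cornerSums : PySem.Set Int :=
    PySem.Set.ofList (mk.1.map (fun rc => PySem.Int.mod (rc.1 + rc.2) period))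
  let output : List (List Int) :=
    (PySem.List.pyRange 0 H 1).map (fun _ => (PySem.List.pyRange 0 W 1).map (fun _ => (4 : Int)))
  -- nested cell loop; output[r][c] = marker_color: Python only executes it with marker corners
  -- present, so marker_color is an int there — the .getD 0 default is never the stored value
  (PySem.List.pyRange 0 H 1).foldl (fun out r =>
    (PySem.List.pyRange 0 W 1).foldl (fun out c =>
      if cornerDiffs.contains (PySem.Int.mod (r - c) period)
          || cornerSums.contains (PySem.Int.mod (r + c) period) then
        out.modify r.toNat (fun row => row.set c.toNat (mk.2.getD 0))
      else out) out) output

-- ===== PORT B =====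
-- grid[r][c]; under Pre_transform every use is in range, so the getD defaults are never taken
def pvCellB (grid : List (List Int)) (r c : Int) : Int :=
  (PySem.List.pyGet? ((PySem.List.pyGet? grid r).getD []) c).getD 0

def transform_alt (grid : List (List Int)) : List (List Int) :=
  let H : Int := grid.length
  let W : Int := ((PySem.List.pyGet? grid 0).getD []).length
  let bg := pvCellB grid (PySem.Int.floordiv H 2) (PySem.Int.floordiv W 2)
  let period : Int := 2 * min (H - 1) (W - 1)
  -- one fused pass over the corners: marker colour and both diagonal-key sets together
  let st := ([(0, 0), (0, W - 1), (H - 1, 0), (H - 1, W - 1)] : List (Int × Int)).foldl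
    (fun (st : Option Int × PySem.Set Int × PySem.Set Int) rc =>
      if pvCellB grid rc.1 rc.2 ≠ bg then
        (some (pvCellB grid rc.1 rc.2),
         PySem.Set.add st.2.1 (PySem.Int.mod (rc.1 - rc.2) period),
         PySem.Set.add st.2.2 (PySem.Int.mod (rc.1 + rc.2) period))
      else st)
    (none, PySem.Set.empty, PySem.Set.empty)
  -- row[c] = marker_color: only reached when a marker exists, so .getD 0 is never stored
  let m := st.1.getD 0
  (PySem.List.pyRange 0 H 1).foldl (fun out r =>
    let row0 := PySem.List.pyRepeat [(4 : Int)] W          -- [4] * W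
    let row1 := st.2.1.foldl (fun row d =>
      (PySem.List.pyRange (PySem.Int.mod (r - d) period) W period).foldl
        (fun row c => row.set c.toNat m) row) row0
    let row2 := st.2.2.foldl (fun row s =>
      (PySem.List.pyRange (PySem.Int.mod (s - r) period) W period).foldl
        (fun row c => row.set c.toNat m) row) row1
    out ++ [row2]) []

-- ===== PRECONDITION & SPEC =====
-- Exactly the inputs on which the Python A returns: at least a 2×2 grid (otherwise the tiling
-- period is 0 and A's '% period' raises ZeroDivisionError) whose centre row reaches column
-- W//2 and whose last row reaches column W-1 (otherwise a corner/centre read raises IndexError).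
def Pre_transform (grid : List (List Int)) : Prop :=
  2 ≤ grid.length ∧ 2 ≤ (grid.headD []).length ∧
  (grid.headD []).length / 2 < (grid.getD (grid.length / 2) []).length ∧
  (grid.headD []).length ≤ (grid.getD (grid.length - 1) []).length
instance (grid : List (List Int)) : Decidable (Pre_transform grid) := by
  unfold Pre_transform; infer_instance

def pvWitness_transform : List (List Int) := [[1, 0], [0, 0]]

def Spec_transform (grid : List (List Int)) (out : List (List Int)) : Prop := out = transform_alt grid
instance (grid : List (List Int)) (out : List (List Int)) : Decidable (Spec_transform grid out) := by unfold Spec_transform; infer_instance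

-- ===== CLAIM (what is proved, stated in full; the proofs are below) =====
def Claim_equal_transform : Prop := ∀ (grid : List (List Int)), Dom_transform grid → Pre_transform grid → Spec_transform grid (transform grid)

-- ===== LEMMAS AND PROOFS =====

lemma pv_emod_cover (p b j : Int) (hp : 0 < p) (hj : 0 ≤ j) :
    (b % p ≤ j ∧ p ∣ (j - b % p)) ↔ j % p = b % p := by
  have hb0 : 0 ≤ b % p := Int.emod_nonneg b (by omega)
  have hbp : b % p < p := Int.emod_lt_of_pos b hp
  constructor
  · rintro ⟨hle, k, hk⟩
    have hj' : j = b % p + p * k := by omega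
    rw [hj', Int.add_mul_emod_self_left, Int.emod_emod_of_dvd b (dvd_refl p)]
  · intro h
    have hdvd : p ∣ (j - b % p) := by
      have h2 : (j - b % p) % p = 0 := by
        rw [Int.sub_emod, h, Int.emod_emod_of_dvd b (dvd_refl p)]; simp
      exact Int.dvd_of_emod_eq_zero h2
    refine ⟨?_, hdvd⟩
    rcases hdvd with ⟨k, hk⟩
    by_cases hk0 : 0 ≤ k
    · nlinarith
    · push Not at hk0; nlinarith

lemma pv_cover_diff (p r d j : Int) (hp : 0 < p) (hd0 : 0 ≤ d) (hdp : d < p) (hj : 0 ≤ j) :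
    ((r - d) % p ≤ j ∧ p ∣ (j - (r - d) % p)) ↔ (r - j) % p = d := by
  rw [pv_emod_cover p (r - d) j hp hj]
  constructor
  · intro h
    have h2 : Int.ModEq p (r - j) (r - (r - d)) := Int.ModEq.sub (Int.ModEq.refl r) h
    have h3 : (r - j) % p = d % p := by simpa [sub_sub_cancel] using h2
    rw [h3, Int.emod_eq_of_lt hd0 hdp]
  · intro h
    have hd : d % p = d := Int.emod_eq_of_lt hd0 hdp
    have h2 : Int.ModEq p (r - j) d := by rw [Int.ModEq, h, hd]
    have h3 : Int.ModEq p (r - (r - j)) (r - d) := Int.ModEq.sub (Int.ModEq.refl r) h2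
    simpa [sub_sub_cancel] using h3

lemma pv_cover_sum (p r s j : Int) (hp : 0 < p) (hs0 : 0 ≤ s) (hsp : s < p) (hj : 0 ≤ j) :
    ((s - r) % p ≤ j ∧ p ∣ (j - (s - r) % p)) ↔ (r + j) % p = s := by
  rw [pv_emod_cover p (s - r) j hp hj]
  constructor
  · intro h
    have h2 : Int.ModEq p (r + j) (r + (s - r)) := Int.ModEq.add (Int.ModEq.refl r) h
    have h3 : (r + j) % p = s % p := by simpa [add_sub_cancel] using h2
    rw [h3, Int.emod_eq_of_lt hs0 hsp]
  · intro h
    have hs : s % p = s := Int.emod_eq_of_lt hs0 hsp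
    have h2 : Int.ModEq p (r + j) s := by rw [Int.ModEq, h, hs]
    have h3 : Int.ModEq p ((r + j) - r) (s - r) := Int.ModEq.sub h2 (Int.ModEq.refl r)
    simpa using h3

-- value of a conditional-set row loop
lemma pv_condset_get (Q : Int → Bool) (m : Int) :
    ∀ (cs : List Int), (∀ c ∈ cs, 0 ≤ c) → ∀ (row : List Int) (j : Nat),
    (cs.foldl (fun row c => if Q c then row.set c.toNat m else row) row)[j]? =
    if (j : Int) ∈ cs ∧ Q (j : Int) then (if j < row.length then some m else none) else row[j]?
  | [], _ => by simp
  | a :: cs', h => by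
    intro row j
    have ha : 0 ≤ a := h a (List.mem_cons_self)
    simp only [List.foldl_cons]
    rw [pv_condset_get Q m cs' (fun c hc => h c (List.mem_cons_of_mem _ hc))]
    by_cases hQ : Q a
    · simp only [hQ, if_true, List.length_set, List.getElem?_set]
      by_cases hja : (j : Int) = a
      · have hja' : a.toNat = j := by omega
        simp only [hja', hja]
        by_cases hmem : (j : Int) ∈ cs' <;> by_cases hQj : Q (j : Int) <;>
          simp_all [List.mem_cons]
      · have hja' : ¬ (a.toNat = j) := by omega
        simp only [if_neg hja', List.mem_cons]
        by_cases hmem : (j : Int) ∈ cs' <;> by_cases hQj : Q (j : Int) <;> simp_all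
    · simp only [hQ, List.mem_cons]
      by_cases hja : (j : Int) = a
      · subst hja; simp_all
      · by_cases hmem : (j : Int) ∈ cs' <;> simp_all

lemma pv_condset_length (Q : Int → Bool) (m : Int) :
    ∀ (cs : List Int) (row : List Int),
    (cs.foldl (fun row c => if Q c then row.set c.toNat m else row) row).length = row.length
  | [], row => rfl
  | a :: cs', row => by
    simp only [List.foldl_cons]
    rw [pv_condset_length Q m cs']
    split_ifs <;> simp

-- one diagonal line: painting along range(a, W, p)
lemma pv_paint_get (m a W p : Int) (hp : 0 < p) (ha : 0 ≤ a) (row : List Int) (j : Nat) :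
    ((PySem.List.pyRange a W p).foldl (fun row c => row.set c.toNat m) row)[j]? =
    if a ≤ (j : Int) ∧ (j : Int) < W ∧ p ∣ ((j : Int) - a) then
      (if j < row.length then some m else none)
    else row[j]? := by
  have h0 : ∀ c ∈ PySem.List.pyRange a W p, 0 ≤ c := by
    intro c hc
    have := (PySem.List.mem_pyRange_iff_of_pos hp c).mp hc
    omega
  have := pv_condset_get (fun _ => true) m (PySem.List.pyRange a W p) h0 row j
  simpa [PySem.List.mem_pyRange_iff_of_pos hp] using this

lemma pv_paint_length (m : Int) (cs : List Int) (row : List Int) :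
    (cs.foldl (fun row c => row.set c.toNat m) row).length = row.length := by
  have := pv_condset_length (fun _ => true) m cs row
  simpa using this

-- a family of diagonal lines (one per key in ds)
lemma pv_paintfold_get (p W m : Int) (hp : 0 < p) (start : Int → Int) (key : Nat → Int) :
    ∀ (ds : List Int), (∀ d ∈ ds, 0 ≤ start d) →
    (∀ d ∈ ds, ∀ j : Nat, (start d ≤ (j : Int) ∧ p ∣ ((j : Int) - start d)) ↔ key j = d) →
    ∀ (row : List Int) (j : Nat),
    (ds.foldl (fun row d =>
        (PySem.List.pyRange (start d) W p).foldl (fun row c => row.set c.toNat m) row) row)[j]? =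
    if key j ∈ ds ∧ (j : Int) < W then (if j < row.length then some m else none) else row[j]?
  | [], _, _ => by simp
  | d :: ds', h0, hcov => by
    intro row j
    simp only [List.foldl_cons]
    rw [pv_paintfold_get p W m hp start key ds'
      (fun x hx => h0 x (List.mem_cons_of_mem _ hx))
      (fun x hx => hcov x (List.mem_cons_of_mem _ hx))]
    have hd0 : 0 ≤ start d := h0 d List.mem_cons_self
    have hcd := hcov d List.mem_cons_self
    rw [pv_paint_length, pv_paint_get m (start d) W p hp hd0 row j]
    by_cases hjW : (j : Int) < W
    · by_cases hmem : key j ∈ ds'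
      · simp only [hmem, hjW, and_true, List.mem_cons, or_true, if_true]
      · by_cases hkd : key j = d
        · have : start d ≤ (j : Int) ∧ p ∣ ((j : Int) - start d) := (hcd j).mpr hkd
          simp_all
        · have : ¬ (start d ≤ (j : Int) ∧ p ∣ ((j : Int) - start d)) := fun hc => hkd ((hcd j).mp hc)
          simp_all
    · have h1 : ¬ (start d ≤ (j : Int) ∧ (j : Int) < W ∧ p ∣ ((j : Int) - start d)) := by tauto
      rw [if_neg h1, if_neg (by tauto), if_neg (by tauto)]

lemma pv_paintfold_length (p W m : Int) (start : Int → Int) :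
    ∀ (ds : List Int) (row : List Int),
    (ds.foldl (fun row d =>
        (PySem.List.pyRange (start d) W p).foldl (fun row c => row.set c.toNat m) row) row).length =
    row.length
  | [], row => rfl
  | d :: ds', row => by
    simp only [List.foldl_cons]
    rw [pv_paintfold_length p W m start ds', pv_paint_length]

-- A's inner cell loop over one row index is a single List.modify
lemma pv_inner_to_modify (Q : Int → Bool) (rn : Nat) (m : Int) :
    ∀ (cs : List Int) (g : List (List Int)),
    cs.foldl (fun g c => if Q c then g.modify rn (fun row => row.set c.toNat m) else g) g =
    g.modify rn (fun row => cs.foldl (fun row c => if Q c then row.set c.toNat m else row) row)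
  | [], g => by
    simp only [List.foldl_nil]
    exact (List.modify_id rn g).symm
  | a :: cs', g => by
    simp only [List.foldl_cons]
    rw [pv_inner_to_modify Q rn m cs']
    by_cases hQ : Q a
    · simp only [hQ, if_true, List.modify_modify_eq]
      rfl
    · simp only [hQ, Bool.false_eq_true, if_false]

-- fold of per-row modifications over distinct row indices
lemma pv_modifyfold_get (f : Nat → List Int → List Int) :
    ∀ (rs : List Nat), rs.Nodup → ∀ (g : List (List Int)) (i : Nat),
    (rs.foldl (fun g r => g.modify r (f r)) g)[i]? =
    if i ∈ rs then (g[i]?).map (f i) else g[i]?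
  | [], _ => by simp
  | a :: rs', hnd => by
    intro g i
    simp only [List.foldl_cons]
    rw [pv_modifyfold_get f rs' hnd.of_cons]
    by_cases hmem : i ∈ rs'
    · have hia : a ≠ i := fun h => (List.nodup_cons.mp hnd).1 (h ▸ hmem)
      simp [hmem, hia]
    · by_cases hia : i = a
      · subst hia; simp [hmem]
      · have hai : ¬ (a = i) := fun h => hia h.symm
        simp [hmem, hia, hai]

lemma pv_ofList_snoc {α : Type} [BEq α] (l : List α) (x : α) :
    PySem.Set.ofList (l ++ [x]) = PySem.Set.add (PySem.Set.ofList l) x := by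
  rw [PySem.Set.ofList_eq_foldl, PySem.Set.ofList_eq_foldl, List.foldl_append]
  rfl

-- B's fused corner pass computes A's marker colour and A's two corner-key sets
lemma pv_preamble_rel (cell : Int × Int → Int) (bg : Int) (fd fs : Int × Int → Int) :
    ∀ (cs mc : List (Int × Int)) (opt : Option Int),
    cs.foldl (fun (st : Option Int × PySem.Set Int × PySem.Set Int) rc =>
        if cell rc ≠ bg then
          (some (cell rc), PySem.Set.add st.2.1 (fd rc), PySem.Set.add st.2.2 (fs rc))
        else st)
      (opt, PySem.Set.ofList (mc.map fd), PySem.Set.ofList (mc.map fs)) =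
    ((cs.foldl (fun (st : List (Int × Int) × Option Int) rc =>
        if cell rc ≠ bg then (st.1 ++ [rc], some (cell rc)) else st) (mc, opt)).2,
     PySem.Set.ofList ((cs.foldl (fun (st : List (Int × Int) × Option Int) rc =>
        if cell rc ≠ bg then (st.1 ++ [rc], some (cell rc)) else st) (mc, opt)).1.map fd),
     PySem.Set.ofList ((cs.foldl (fun (st : List (Int × Int) × Option Int) rc =>
        if cell rc ≠ bg then (st.1 ++ [rc], some (cell rc)) else st) (mc, opt)).1.map fs))
  | [], mc, opt => by simp
  | rc :: cs', mc, opt => by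
    simp only [List.foldl_cons]
    by_cases hc : cell rc ≠ bg
    · simp only [if_pos hc]
      have h1 : PySem.Set.add (PySem.Set.ofList (mc.map fd)) (fd rc) =
          PySem.Set.ofList ((mc ++ [rc]).map fd) := by
        rw [List.map_append, List.map_singleton, pv_ofList_snoc]
      have h2 : PySem.Set.add (PySem.Set.ofList (mc.map fs)) (fs rc) =
          PySem.Set.ofList ((mc ++ [rc]).map fs) := by
        rw [List.map_append, List.map_singleton, pv_ofList_snoc]
      rw [h1, h2]
      exact pv_preamble_rel cell bg fd fs cs' (mc ++ [rc]) (some (cell rc))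
    · simp only [if_neg hc]
      exact pv_preamble_rel cell bg fd fs cs' mc opt

-- one output row: A's per-cell membership test = B's painted diagonals
lemma pv_row_eq (Wn : Nat) (p m r : Int) (D S : PySem.Set Int) (hp : 0 < p)
    (hD : ∀ d ∈ D, 0 ≤ d ∧ d < p) (hS : ∀ s ∈ S, 0 ≤ s ∧ s < p) :
    (PySem.List.pyRange 0 (Wn : Int) 1).foldl (fun row c =>
        if PySem.Set.contains D (PySem.Int.mod (r - c) p)
            || PySem.Set.contains S (PySem.Int.mod (r + c) p) then
          row.set c.toNat m
        else row)
      ((PySem.List.pyRange 0 (Wn : Int) 1).map (fun _ => (4 : Int))) =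
    S.foldl (fun row s =>
        (PySem.List.pyRange (PySem.Int.mod (s - r) p) (Wn : Int) p).foldl
          (fun row c => row.set c.toNat m) row)
      (D.foldl (fun row d =>
          (PySem.List.pyRange (PySem.Int.mod (r - d) p) (Wn : Int) p).foldl
            (fun row c => row.set c.toNat m) row)
        (PySem.List.pyRepeat [(4 : Int)] (Wn : Int))) := by
  have hmod : ∀ a : Int, PySem.Int.mod a p = a % p := fun a => PySem.Int.mod_eq_emod_of_pos hp
  apply List.ext_getElem?
  intro j
  -- left side
  have hL := pv_condset_get
    (fun c => PySem.Set.contains D (PySem.Int.mod (r - c) p)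
        || PySem.Set.contains S (PySem.Int.mod (r + c) p)) m
    (PySem.List.pyRange 0 (Wn : Int) 1)
    (fun c hc => ((PySem.List.mem_pyRange_one).mp hc).1)
    ((PySem.List.pyRange 0 (Wn : Int) 1).map (fun _ => (4 : Int))) j
  rw [hL]
  -- right side, sums layer then diffs layer
  have hSstart : ∀ s ∈ S, 0 ≤ PySem.Int.mod (s - r) p := fun s _ => PySem.Int.mod_nonneg _ hp
  have hScov : ∀ s ∈ S, ∀ j : Nat,
      (PySem.Int.mod (s - r) p ≤ (j : Int) ∧ p ∣ ((j : Int) - PySem.Int.mod (s - r) p)) ↔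
      PySem.Int.mod (r + (j : Int)) p = s := by
    intro s hs j
    rw [hmod, hmod]
    exact pv_cover_sum p r s j hp (hS s hs).1 (hS s hs).2 (by positivity)
  have hDstart : ∀ d ∈ D, 0 ≤ PySem.Int.mod (r - d) p := fun d _ => PySem.Int.mod_nonneg _ hp
  have hDcov : ∀ d ∈ D, ∀ j : Nat,
      (PySem.Int.mod (r - d) p ≤ (j : Int) ∧ p ∣ ((j : Int) - PySem.Int.mod (r - d) p)) ↔
      PySem.Int.mod (r - (j : Int)) p = d := by
    intro d hd j
    rw [hmod, hmod]
    exact pv_cover_diff p r d j hp (hD d hd).1 (hD d hd).2 (by positivity)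
  rw [pv_paintfold_get p (Wn : Int) m hp _ (fun j => PySem.Int.mod (r + (j : Int)) p) S hSstart hScov,
      pv_paintfold_get p (Wn : Int) m hp _ (fun j => PySem.Int.mod (r - (j : Int)) p) D hDstart hDcov,
      pv_paintfold_length, PySem.List.pyRepeat_singleton]
  -- now both sides are nested ifs over memberships
  have hlen : (List.replicate (Wn : Int).toNat (4 : Int)).length = Wn := by simp
  have hmaplen : (((PySem.List.pyRange 0 (Wn : Int) 1).map (fun _ => (4 : Int)))).length = Wn := by
    simp [PySem.List.length_pyRange_one]
  have hmem : ((j : Int) ∈ PySem.List.pyRange 0 (Wn : Int) 1) ↔ j < Wn := by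
    rw [PySem.List.mem_pyRange_one]; omega
  have hget4 : (((PySem.List.pyRange 0 (Wn : Int) 1).map (fun _ => (4 : Int))))[j]? =
      if j < Wn then some 4 else none := by
    rw [List.getElem?_map, PySem.List.getElem?_pyRange_one]
    by_cases hj : j < Wn
    · rw [if_pos (by omega : j < ((Wn : Int) - 0).toNat), if_pos hj]; rfl
    · rw [if_neg (by omega : ¬ j < ((Wn : Int) - 0).toNat), if_neg hj]; rfl
  rw [hget4, List.getElem?_replicate, hlen, hmaplen]
  simp only [hmem, Int.toNat_natCast, Nat.cast_lt]
  by_cases hj : j < Wn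
  · simp only [hj, true_and, and_true, if_true]
    by_cases hd : PySem.Int.mod (r - (j : Int)) p ∈ D <;>
      by_cases hs : PySem.Int.mod (r + (j : Int)) p ∈ S <;>
        simp [PySem.Set.contains, hd, hs]
  · simp only [hj, false_and, and_false, if_false]

lemma pv_foldl_range_cast {β : Type} (f : β → Int → β) (n : Nat) (init : β) :
    (PySem.List.pyRange 0 (n : Int) 1).foldl f init =
    (List.range n).foldl (fun acc (k : Nat) => f acc (k : Int)) init := by
  rw [PySem.List.pyRange_zero_natCast]
  exact List.foldl_map (f := fun k : Nat => (k : Int)) (g := f) (l := List.range n) (init := init)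

-- whole grid: A's nested cell loops = B's row-by-row diagonal drawing
lemma pv_core (Hn Wn : Nat) (p m : Int) (D S : PySem.Set Int) (hp : 0 < p)
    (hD : ∀ d ∈ D, 0 ≤ d ∧ d < p) (hS : ∀ s ∈ S, 0 ≤ s ∧ s < p) :
    (PySem.List.pyRange 0 (Hn : Int) 1).foldl (fun out r =>
      (PySem.List.pyRange 0 (Wn : Int) 1).foldl (fun out c =>
        if PySem.Set.contains D (PySem.Int.mod (r - c) p)
            || PySem.Set.contains S (PySem.Int.mod (r + c) p) then
          out.modify r.toNat (fun row => row.set c.toNat m)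
        else out) out)
      ((PySem.List.pyRange 0 (Hn : Int) 1).map
        (fun _ => (PySem.List.pyRange 0 (Wn : Int) 1).map (fun _ => (4 : Int)))) =
    (PySem.List.pyRange 0 (Hn : Int) 1).foldl (fun out r =>
      out ++ [S.foldl (fun row s =>
          (PySem.List.pyRange (PySem.Int.mod (s - r) p) (Wn : Int) p).foldl
            (fun row c => row.set c.toNat m) row)
        (D.foldl (fun row d =>
            (PySem.List.pyRange (PySem.Int.mod (r - d) p) (Wn : Int) p).foldl
              (fun row c => row.set c.toNat m) row)
          (PySem.List.pyRepeat [(4 : Int)] (Wn : Int)))]) [] := by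
  -- B side is a map over the rows
  rw [PySem.List.foldl_append_singleton_eq_map (fun r =>
    S.foldl (fun row s =>
        (PySem.List.pyRange (PySem.Int.mod (s - r) p) (Wn : Int) p).foldl
          (fun row c => row.set c.toNat m) row)
      (D.foldl (fun row d =>
          (PySem.List.pyRange (PySem.Int.mod (r - d) p) (Wn : Int) p).foldl
            (fun row c => row.set c.toNat m) row)
        (PySem.List.pyRepeat [(4 : Int)] (Wn : Int)))) (PySem.List.pyRange 0 (Hn : Int) 1) []]
  -- A side: each inner loop is one List.modify on its own row index
  rw [PySem.List.foldl_congr_mem _ _ (g := fun out r =>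
      out.modify r.toNat (fun row =>
        (PySem.List.pyRange 0 (Wn : Int) 1).foldl (fun row c =>
          if PySem.Set.contains D (PySem.Int.mod (r - c) p)
              || PySem.Set.contains S (PySem.Int.mod (r + c) p) then
            row.set c.toNat m
          else row) row)) _
    (fun acc r _ => pv_inner_to_modify
      (fun c => PySem.Set.contains D (PySem.Int.mod (r - c) p)
          || PySem.Set.contains S (PySem.Int.mod (r + c) p)) r.toNat m
      (PySem.List.pyRange 0 (Wn : Int) 1) acc)]
  rw [pv_foldl_range_cast]
  simp only [Int.toNat_natCast]
  apply List.ext_getElem?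
  intro i
  rw [pv_modifyfold_get _ (List.range Hn) (List.nodup_range)]
  simp only [List.mem_range, List.nil_append, List.getElem?_map]
  by_cases hi : i < Hn
  · have hpg : (PySem.List.pyRange 0 (Hn : Int) 1)[i]? = some (i : Int) := by
      rw [PySem.List.getElem?_pyRange_one, if_pos (by omega : i < ((Hn : Int) - 0).toNat)]
      norm_num
    simp only [hi, if_true, hpg, Option.map_some]
    exact congrArg some (pv_row_eq Wn p m (i : Int) D S hp hD hS)
  · have hpg : (PySem.List.pyRange 0 (Hn : Int) 1)[i]? = none := by
      rw [PySem.List.getElem?_pyRange_one, if_neg (by omega : ¬ i < ((Hn : Int) - 0).toNat)]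
    simp only [hi, if_false, hpg, Option.map_none]

lemma pv_get0 (l : List (List Int)) : (PySem.List.pyGet? l 0).getD [] = l.headD [] := by
  cases l <;> simp [PySem.List.pyGet?, PySem.List.pyIdx?]

lemma pv_preamble_rel' (cell : Int × Int → Int) (bg : Int) (fd fs : Int × Int → Int)
    (cs : List (Int × Int)) :
    cs.foldl (fun (st : Option Int × PySem.Set Int × PySem.Set Int) rc =>
        if cell rc ≠ bg then
          (some (cell rc), PySem.Set.add st.2.1 (fd rc), PySem.Set.add st.2.2 (fs rc))
        else st)
      (none, PySem.Set.empty, PySem.Set.empty) =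
    ((cs.foldl (fun (st : List (Int × Int) × Option Int) rc =>
        if cell rc ≠ bg then (st.1 ++ [rc], some (cell rc)) else st) ([], none)).2,
     PySem.Set.ofList ((cs.foldl (fun (st : List (Int × Int) × Option Int) rc =>
        if cell rc ≠ bg then (st.1 ++ [rc], some (cell rc)) else st) ([], none)).1.map fd),
     PySem.Set.ofList ((cs.foldl (fun (st : List (Int × Int) × Option Int) rc =>
        if cell rc ≠ bg then (st.1 ++ [rc], some (cell rc)) else st) ([], none)).1.map fs)) := by
  have h := pv_preamble_rel cell bg fd fs cs [] none
  simpa [PySem.Set.empty, PySem.Set.ofList_eq_foldl] using h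

lemma pv_mod_bounds (p : Int) (hp : 0 < p) (f : Int × Int → Int) (l : List (Int × Int)) :
    ∀ d ∈ PySem.Set.ofList (l.map (fun rc => PySem.Int.mod (f rc) p)), 0 ≤ d ∧ d < p := by
  intro d hd
  rw [PySem.Set.mem_ofList] at hd
  obtain ⟨rc, _, rfl⟩ := List.mem_map.mp hd
  exact ⟨PySem.Int.mod_nonneg _ hp, PySem.Int.mod_lt _ hp⟩

-- ===== VERDICT (by name: the statement is the Claim_ definition above) =====
theorem transform_spec : Claim_equal_transform := by
  intro grid _ hpre
  obtain ⟨h2H, h2W, _, _⟩ := hpre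
  unfold Spec_transform
  show transform grid = transform_alt grid
  have hWlen : 2 ≤ ((PySem.List.pyGet? grid 0).getD []).length := by
    rw [pv_get0]; exact h2W
  simp only [transform, transform_alt]
  rw [show pvCellB = pvCellA from rfl]
  rw [pv_preamble_rel' (fun rc => pvCellA grid rc.1 rc.2)]
  have hp : 0 < 2 * min ((grid.length : Int) - 1)
      (((((PySem.List.pyGet? grid 0).getD []).length : Nat) : Int) - 1) := by
    have h1 : (2 : Int) ≤ (grid.length : Int) := by exact_mod_cast h2H
    have h2 : (2 : Int) ≤ ((((PySem.List.pyGet? grid 0).getD []).length : Nat) : Int) := by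
      exact_mod_cast hWlen
    omega
  exact pv_core grid.length ((PySem.List.pyGet? grid 0).getD []).length _ _ _ _ hp
    (pv_mod_bounds _ hp (fun rc => rc.1 - rc.2) _)
    (pv_mod_bounds _ hp (fun rc => rc.1 + rc.2) _)
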